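-- pv_equiv track=rewrite | github.com/BenEskilstark/Graphs | prims.py | seed
-- ===== SOURCE A (Python) =====
-- def seed(matrix,not_edge):
-- 	i = 0
-- 	smallest = not_edge
-- 	smallest_coord = []
-- 	while i < len(matrix):
-- 		j = 0
-- 		while j < len(matrix[i]):
-- 			if matrix[i][j] < smallest:
-- 				smallest = matrix[i][j]
-- 				smallest_coord = (i,j)
-- 			j += 1
-- 		i += 1
-- 	return [smallest_coord]
-- ===== SOURCE B (Python) =====
-- def seed(matrix, not_edge):
--     vals = [v for row in matrix for v in row if v < not_edge]
--     if not vals: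
--         return [[]]
--     m = min(vals)
--     for i, row in enumerate(matrix):
--         if m in row:
--             return [(i, row.index(m))]
-- ===== Notes on version B (the rewrite author's own statement) =====
-- stated objective: alternative
-- what changed: Replaces A's single running-minimum scan with mutable state by two independent stages: first compute the minimum value of all sub-threshold entries over the flattened matrix, then locate its first row-major occurrence with a separate row search (membership test + row.index).
-- outside the precondition, e.g. on seed([[1]], 0): A returns [()], B returns [()]
import Mathlib
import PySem

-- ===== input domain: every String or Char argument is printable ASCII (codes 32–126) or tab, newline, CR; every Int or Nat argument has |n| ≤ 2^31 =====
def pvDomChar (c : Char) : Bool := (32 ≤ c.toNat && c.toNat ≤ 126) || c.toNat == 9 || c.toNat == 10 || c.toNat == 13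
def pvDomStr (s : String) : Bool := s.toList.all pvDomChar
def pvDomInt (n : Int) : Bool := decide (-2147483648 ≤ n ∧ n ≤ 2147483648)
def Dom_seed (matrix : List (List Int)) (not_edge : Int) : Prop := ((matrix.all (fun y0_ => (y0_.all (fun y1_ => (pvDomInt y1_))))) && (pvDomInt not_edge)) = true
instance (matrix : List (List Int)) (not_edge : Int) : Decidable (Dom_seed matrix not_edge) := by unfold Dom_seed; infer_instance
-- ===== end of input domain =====

-- B finds the minimum value of the sub-threshold entries in one pass over the flattened matrix,
-- then locates its first row-major occurrence with a separate row search (membership + index);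
-- objective: simpler. Equivalence on Pre_ (some entry < not_edge).


-- ===== PORT A =====
-- A's nested whiles walk the rows (index i) and each row's entries (index j), keeping the
-- running strict minimum `smallest` (seeded with not_edge) and its coordinate `smallest_coord`
-- (Option: none = the Python initial []).  Ported as folds over the enumerated rows/entries,
-- the same state and the same update in the same order.
def seed (matrix : List (List Int)) (not_edge : Int) : List (Int × Int) :=
  let st : Int × Option (Int × Int) :=
    (PySem.List.enumerate matrix).foldl (fun st ir =>
      (PySem.List.enumerate ir.2).foldl (fun st jv =>
        if jv.2 < st.1 then (jv.2, some (ir.1, jv.1)) else st) st)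
      (not_edge, none)
  -- Python returns [smallest_coord]; the not-found value [[]] is no List (Int × Int), excluded by Pre_
  match st.2 with
  | some p => [p]
  | none => []

-- ===== PORT B =====
-- vals comprehension = row-major flatten filtered below the threshold; the for-loop with
-- early return = find? over the enumerated rows of the first row containing m, then row.index(m).
def seed_alt (matrix : List (List Int)) (not_edge : Int) : List (Int × Int) :=
  let vals : List Int := matrix.flatten.filter (fun v => v < not_edge)
  match PySem.List.min? vals (fun v => v) with
  | none => []   -- Python B returns [[]] here, not a List (Int × Int); excluded by Pre_
  | some m =>
    match (PySem.List.enumerate matrix).find? (fun ir => ir.2.contains m) with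
    | some ir =>
      match PySem.List.index? ir.2 m with
      | some j => [(ir.1, (j : Int))]
      | none => []      -- unreachable: m ∈ ir.2
    | none => []        -- unreachable: m came from the matrix

-- ===== PRECONDITION & SPEC =====
-- Pre_ excludes inputs with no entry strictly below not_edge: there Python A RETURNS [[]],
-- a list containing an empty list, which is not a value of the declared type List (Int × Int)
-- (B returns the same [[]] in Python; both ports return [] there).
def Pre_seed (matrix : List (List Int)) (not_edge : Int) : Prop :=
  ∃ v ∈ matrix.flatten, v < not_edge
instance (matrix : List (List Int)) (not_edge : Int) : Decidable (Pre_seed matrix not_edge) := by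
  unfold Pre_seed; infer_instance
def pvWitness_seed : List (List Int) × Int := ([[3, -1], [2]], 0)
def Spec_seed (matrix : List (List Int)) (not_edge : Int) (out : List (Int × Int)) : Prop := out = seed_alt matrix not_edge
instance (matrix : List (List Int)) (not_edge : Int) (out : List (Int × Int)) : Decidable (Spec_seed matrix not_edge out) := by unfold Spec_seed; infer_instance

-- ===== CLAIM (what is proved, stated in full; the proofs are below) =====
def Claim_equal_seed : Prop := ∀ (matrix : List (List Int)) (not_edge : Int), Dom_seed matrix not_edge → Pre_seed matrix not_edge → Spec_seed matrix not_edge (seed matrix not_edge)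

-- ===== LEMMAS AND PROOFS =====

-- the row-major list of (value, i, j) triples starting at row index s, and A's state update on it
def pvTriples (s : Int) (matrix : List (List Int)) : List (Int × Int × Int) :=
  (PySem.List.enumerate matrix s).flatMap (fun ir =>
    (PySem.List.enumerate ir.2).map (fun jv => (jv.2, ir.1, jv.1)))

def pvUpd (st : Int × Option (Int × Int)) (t : Int × Int × Int) : Int × Option (Int × Int) :=
  if t.1 < st.1 then (t.1, some t.2) else st

def pvFirstMin (c : Int × Int × Int) (cs : List (Int × Int × Int)) : Int × Int × Int :=
  cs.foldl (fun m x => if x.1 < m.1 then x else m) c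

theorem foldl_flatMap' {α β γ : Type} (l : List α) (g : α → List β) (f : γ → β → γ) (i : γ) :
    (l.flatMap g).foldl f i = l.foldl (fun s x => (g x).foldl f s) i := by
  induction l generalizing i with
  | nil => rfl
  | cons h t ih => simp [List.flatMap_cons, List.foldl_append, ih]

theorem find?_cons_pos' {α : Type} (p : α → Bool) (a : α) (l : List α) (h : p a = true) :
    (a :: l).find? p = some a := List.find?_cons_of_pos h

theorem find?_cons_neg' {α : Type} (p : α → Bool) (a : α) (l : List α) (h : ¬ p a = true) :
    (a :: l).find? p = l.find? p := List.find?_cons_of_neg h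

-- A's nested fold is the fold of pvUpd over the flattened triples
theorem seed_fold_eq (matrix : List (List Int)) (not_edge : Int) :
    (PySem.List.enumerate matrix).foldl (fun st ir =>
      (PySem.List.enumerate ir.2).foldl (fun st jv =>
        if jv.2 < st.1 then (jv.2, some (ir.1, jv.1)) else st) st)
      ((not_edge, none) : Int × Option (Int × Int))
    = (pvTriples 0 matrix).foldl pvUpd (not_edge, none) := by
  rw [pvTriples, foldl_flatMap']
  apply PySem.List.foldl_congr_mem
  intro st ir _
  rw [List.foldl_map]
  rfl

-- elements with value ≥ the current (≤ not_edge) minimum never fire: filter them away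
theorem foldl_upd_filter (ne : Int) (L : List (Int × Int × Int)) :
    ∀ (s : Int) (c : Option (Int × Int)), s ≤ ne →
    L.foldl pvUpd (s, c) = (L.filter (fun t => t.1 < ne)).foldl pvUpd (s, c) := by
  induction L with
  | nil => intro s c _; rfl
  | cons h t ih =>
    intro s c hs
    by_cases hlt : h.1 < ne
    · rw [List.filter_cons, if_pos (by simpa using hlt), List.foldl_cons, List.foldl_cons]
      rcases e : pvUpd (s, c) h with ⟨s', c'⟩
      have hs' : s' ≤ ne := by
        by_cases hfire : h.1 < s <;> simp [pvUpd, hfire] at e <;> omega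
      exact ih s' c' hs'
    · have hfire : ¬ h.1 < s := fun hc => hlt (lt_of_lt_of_le hc hs)
      rw [List.filter_cons, if_neg (by simpa using hlt), List.foldl_cons]
      have hskip : pvUpd (s, c) h = (s, c) := by simp [pvUpd, hfire]
      rw [hskip]
      exact ih s c hs

-- running pvUpd from a live coordinate is the first-min fold, lifted
theorem foldl_upd_some (t : List (Int × Int × Int)) :
    ∀ (p : Int × Int × Int),
    t.foldl pvUpd (p.1, some p.2) = ((pvFirstMin p t).1, some (pvFirstMin p t).2) := by
  induction t with
  | nil => intro p; rfl
  | cons h tl ih =>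
    intro p
    by_cases hlt : h.1 < p.1
    · simp only [List.foldl_cons, pvUpd, hlt, if_pos, pvFirstMin]
      exact ih h
    · simp only [List.foldl_cons, pvUpd, hlt, if_neg, not_false_iff, pvFirstMin]
      exact ih p

-- the first-min fold yields a minimal element and is the FIRST element attaining its value
theorem firstMin_char (cs : List (Int × Int × Int)) :
    ∀ (c : Int × Int × Int),
    (∀ y ∈ c :: cs, (pvFirstMin c cs).1 ≤ y.1) ∧
    (c :: cs).find? (fun t => t.1 == (pvFirstMin c cs).1) = some (pvFirstMin c cs) := by
  induction cs with
  | nil => intro c; simp [pvFirstMin, List.find?]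
  | cons x tl ih =>
    intro c
    by_cases hlt : x.1 < c.1
    · have hx : pvFirstMin c (x :: tl) = pvFirstMin x tl := by
        simp [pvFirstMin, hlt]
      obtain ⟨hmin, hfind⟩ := ih x
      refine ⟨?_, ?_⟩
      · intro y hy
        rcases List.mem_cons.1 hy with rfl | hy'
        · have := hmin x (by simp)
          rw [hx]; omega
        · rw [hx]; exact hmin y hy'
      · have hcne : ¬ (c.1 == (pvFirstMin c (x :: tl)).1) = true := by
          have := hmin x (by simp)
          rw [hx]; simp; omega
        rw [find?_cons_neg' (fun t => t.1 == (pvFirstMin c (x :: tl)).1) c (x :: tl) hcne,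
          hx]
        exact hfind
    · have hx : pvFirstMin c (x :: tl) = pvFirstMin c tl := by
        simp [pvFirstMin, hlt]
      obtain ⟨hmin, hfind⟩ := ih c
      refine ⟨?_, ?_⟩
      · intro y hy
        rcases List.mem_cons.1 hy with rfl | hy'
        · rw [hx]; exact hmin y (by simp)
        rcases List.mem_cons.1 hy' with rfl | hy''
        · have := hmin c (by simp)
          rw [hx]; omega
        · rw [hx]; exact hmin y (by simp [hy''])
      · rw [hx]
        by_cases hc : (c.1 == (pvFirstMin c tl).1) = true
        · rw [find?_cons_pos' (fun t => t.1 == (pvFirstMin c tl).1) c (x :: tl) hc]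
          rw [find?_cons_pos' (fun t => t.1 == (pvFirstMin c tl).1) c tl hc] at hfind
          exact hfind
        · have hcmin := hmin c (by simp)
          have hxne : ¬ (x.1 == (pvFirstMin c tl).1) = true := by
            simp at hc ⊢; simp at hlt; omega
          rw [find?_cons_neg' (fun t => t.1 == (pvFirstMin c tl).1) c (x :: tl) hc,
            find?_cons_neg' (fun t => t.1 == (pvFirstMin c tl).1) x tl hxne]
          rw [find?_cons_neg' (fun t => t.1 == (pvFirstMin c tl).1) c tl hc] at hfind
          exact hfind

theorem map_fst_pvTriples (matrix : List (List Int)) (s : Int) :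
    (pvTriples s matrix).map (fun t => t.1) = matrix.flatten := by
  induction matrix generalizing s with
  | nil => rfl
  | cons r rest ih =>
    simp only [pvTriples, PySem.List.enumerate_cons, List.flatMap_cons, List.map_append,
      List.flatten_cons]
    rw [List.map_map]
    congr 1
    · exact PySem.List.map_snd_enumerate r 0
    · exact ih (s + 1)

-- find? over the triples ignores a filter weaker than its predicate
theorem find?_filter_of_imp {α : Type} (l : List α) (p q : α → Bool)
    (h : ∀ x, q x = true → p x = true) :
    (l.filter p).find? q = l.find? q := by
  induction l with
  | nil => rfl
  | cons a t ih =>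
    by_cases hq : q a = true
    · rw [List.filter_cons, if_pos (h a hq), find?_cons_pos' _ _ _ hq,
        find?_cons_pos' _ _ _ hq]
    · by_cases hp : p a = true
      · rw [List.filter_cons, if_pos hp, find?_cons_neg' _ _ _ hq,
          find?_cons_neg' _ _ _ hq]; exact ih
      · rw [List.filter_cons, if_neg hp, find?_cons_neg' _ _ _ hq]; exact ih

-- per-row: finding the first entry equal to m in an enumerated row is row.index(m)
theorem enum_find_index (m : Int) (row : List Int) :
    ∀ (s : Int), (PySem.List.enumerate row s).find? (fun jv => jv.2 == m)
      = (PySem.List.index? row m).map (fun j : Nat => (s + (j : Int), m)) := by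
  induction row with
  | nil => intro s; rfl
  | cons x xs ih =>
    intro s
    by_cases hx : x = m
    · subst hx
      rw [PySem.List.enumerate_cons, PySem.List.index?_cons_self]
      simp [List.find?]
    · rw [PySem.List.enumerate_cons, PySem.List.index?_cons_of_ne _ hx,
        find?_cons_neg' _ _ _ (by simp [hx]), ih (s + 1), Option.map_map]
      congr 1
      funext j
      simp only [Function.comp_apply, Prod.mk.injEq, and_true]
      push_cast
      omega

-- find? over the whole triple list = first row containing m, then row.index(m)
theorem triples_find_eq (m : Int) (matrix : List (List Int)) :
    ∀ (s : Int),
    ((pvTriples s matrix).find? (fun t => t.1 == m)).map (fun t => t.2)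
      = match (PySem.List.enumerate matrix s).find? (fun ir => ir.2.contains m) with
        | some ir => (PySem.List.index? ir.2 m).map (fun j : Nat => (ir.1, (j : Int)))
        | none => none := by
  induction matrix with
  | nil => intro s; rfl
  | cons row rest ih =>
    intro s
    rw [pvTriples, PySem.List.enumerate_cons, List.flatMap_cons, List.find?_append]
    have hrow : ((PySem.List.enumerate row).map
        (fun jv => ((jv.2, s, jv.1) : Int × Int × Int))).find? (fun t => t.1 == m)
        = (PySem.List.index? row m).map (fun j : Nat => (m, s, (j : Int))) := by
      rw [List.find?_map]
      have hpred : ((fun t : Int × Int × Int => t.1 == m) ∘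
          (fun jv : Int × Int => ((jv.2, s, jv.1) : Int × Int × Int)))
          = (fun jv : Int × Int => jv.2 == m) := rfl
      rw [hpred, enum_find_index m row 0, Option.map_map]
      congr 1
      funext j
      simp
    by_cases hmem : m ∈ row
    · have hc : (row.contains m) = true := by simpa using hmem
      rw [find?_cons_pos' _ _ _ (by simpa using hc)]
      rw [hrow]
      rcases hix : PySem.List.index? row m with _ | j
      · exact absurd ((PySem.List.index?_eq_none_iff _ _).1 hix) (by simpa using hmem)
      · rw [PySem.List.index?_eq_idxOf?] at hix
        simp [hix]
    · have hinone : PySem.List.index? row m = none :=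
        (PySem.List.index?_eq_none_iff _ _).2 hmem
      have hc : (row.contains m) = false := by simpa using hmem
      rw [find?_cons_neg' _ _ _ (by simpa using hmem)]
      rw [hrow, hinone]
      simpa [pvTriples] using ih (s + 1)

theorem filter_ne_nil_of_pre (matrix : List (List Int)) (not_edge : Int)
    (hpre : Pre_seed matrix not_edge) :
    (pvTriples 0 matrix).filter (fun t => t.1 < not_edge) ≠ [] := by
  obtain ⟨v, hv, hlt⟩ := hpre
  rw [← map_fst_pvTriples matrix 0] at hv
  obtain ⟨t, ht, rfl⟩ := List.mem_map.1 hv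
  intro hnil
  have := List.filter_eq_nil_iff.1 hnil t ht
  simp [hlt] at this

-- ===== VERDICT (by name: the statement is the Claim_ definition above) =====
theorem seed_spec : Claim_equal_seed := by
  intro matrix not_edge _ hpre
  unfold Spec_seed seed seed_alt
  simp only [seed_fold_eq]
  rw [foldl_upd_filter not_edge (pvTriples 0 matrix) not_edge none le_rfl]
  set L := (pvTriples 0 matrix).filter (fun t => t.1 < not_edge) with hL
  have hne : L ≠ [] := filter_ne_nil_of_pre matrix not_edge hpre
  obtain ⟨c, cs, hct⟩ := List.exists_cons_of_ne_nil hne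
  have hc : c.1 < not_edge := by
    have hmem : c ∈ L := hct ▸ List.mem_cons_self
    rw [hL] at hmem
    exact of_decide_eq_true (List.mem_filter.1 hmem).2
  -- A's side: first-min of the candidates
  rw [hct, List.foldl_cons]
  have hstep : pvUpd (not_edge, none) c = (c.1, some c.2) := by simp [pvUpd, hc]
  rw [hstep, foldl_upd_some cs c]
  set r := pvFirstMin c cs with hr
  obtain ⟨hmin, hfind⟩ := firstMin_char cs c
  -- B's side: vals = values of L
  have hvals : matrix.flatten.filter (fun v => v < not_edge) = L.map (fun t => t.1) := by
    rw [← map_fst_pvTriples matrix 0, hL, List.filter_map]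
    rfl
  rw [hvals, hct, List.map_cons]
  have hmv := PySem.List.min?_id_cons c.1 (cs.map (fun t => t.1))
  -- the minimum value equals r.1
  have hmveq : (cs.map (fun t => t.1)).foldl min c.1 = r.1 := by
    have h1 : r.1 ≤ (cs.map (fun t => t.1)).foldl min c.1 := by
      have hmvmem := PySem.List.min?_mem hmv
      rcases List.mem_cons.1 hmvmem with he | hm
      · rw [he]; exact hmin c (by simp)
      · obtain ⟨t, htmem, htv⟩ := List.mem_map.1 hm
        rw [← htv]; exact hmin t (by simp [htmem])
    have h2 : (cs.map (fun t => t.1)).foldl min c.1 ≤ r.1 := by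
      have hr_mem : r.1 ∈ c.1 :: cs.map (fun t => t.1) := by
        have hrl : r ∈ c :: cs := List.mem_of_find?_eq_some hfind
        rcases List.mem_cons.1 hrl with he | hm
        · rw [he]; simp
        · exact List.mem_cons_of_mem _ (List.mem_map.2 ⟨r, hm, rfl⟩)
      simpa using PySem.List.min?_isMin hmv r.1 hr_mem
    omega
  rw [hmv, hmveq]
  -- B's row search finds exactly r.2
  have hfind' : (pvTriples 0 matrix).find? (fun t => t.1 == r.1) = some r := by
    rw [← find?_filter_of_imp (pvTriples 0 matrix)
          (fun t => t.1 < not_edge) (fun t => t.1 == r.1)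
          (fun x hx => by
            have hx' : x.1 = r.1 := by simpa using hx
            have hrc : r.1 ≤ c.1 := hmin c (by simp)
            simp only [hx', decide_eq_true_eq]
            omega),
        ← hL, hct]
    exact hfind
  have hmain := triples_find_eq r.1 matrix 0
  rw [hfind'] at hmain
  simp only [Option.map_some] at hmain
  rcases hfr : (PySem.List.enumerate matrix).find? (fun ir => ir.2.contains r.1) with _ | ir
  · rw [hfr] at hmain; simp at hmain
  · rw [hfr] at hmain
    dsimp only at hmain
    rcases hix : PySem.List.index? ir.2 r.1 with _ | j
    · rw [hix] at hmain; simp at hmain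
    · rw [hix] at hmain
      simp only [Option.map_some] at hmain
      injection hmain with hmain
      have hfr' : List.find? (fun ir => decide (r.1 ∈ ir.2)) (PySem.List.enumerate matrix)
          = some ir := by simpa using hfr
      have hix' : List.idxOf? r.1 ir.2 = some j := by
        simpa [PySem.List.index?_eq_idxOf?] using hix
      simp [hfr', hix', hmain]
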